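-- pv_equiv track=rewrite | github.com/qiyitang71/Random-Arena-Games | experiments/fpraas-reach.py | is_priority0_only_region
-- ===== SOURCE A (Python) =====
-- from collections import deque
--
-- def is_priority0_only_region(start_vertex, vertices, edges):
--     """
--     Check if the start_vertex has priority 0 and all vertices reachable from it
--     also have priority 0.
--     """
--     if vertices.get(start_vertex, -1) != 0:
--         return False
--
--     visited = set()
--     queue = deque([start_vertex])
--
--     while queue:
--         current = queue.popleft()
--         if current in visited:
--             continue
--         visited.add(current)
--
--         if vertices.get(current, -1) != 0:
--             return False
--
--         for neighbor in edges.get(current, []):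
--             if neighbor not in visited:
--                 queue.append(neighbor)
--
--     return True
-- ===== SOURCE B (Python) =====
-- def is_priority0_only_region(start_vertex, vertices, edges):
--     # B: no BFS/DFS frontier at all. Keep A's start guard, then compute the
--     # reachable set by round-based fixpoint saturation (repeated full passes
--     # over the edge table until nothing new is added), and finally check the
--     # priority of every collected vertex in one separate all() pass.
--     if vertices.get(start_vertex, -1) != 0:
--         return False
--
--     reachable = {start_vertex}
--     changed = True
--     while changed:
--         changed = False
--         for u in edges:
--             if u in reachable:
--                 for n in edges.get(u, []):
--                     if n not in reachable:
--                         reachable.add(n)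
--                         changed = True
--
--     return all(vertices.get(v, -1) == 0 for v in reachable)
-- ===== Notes on version B (the rewrite author's own statement) =====
-- stated objective: alternative
-- what changed: A runs a worklist BFS (deque) that checks priorities during the traversal with an early False return; B has no frontier structure at all: it saturates the reachable set by repeated full passes over the edge table until a fixpoint, then checks all priorities in one separate all() pass.
import Mathlib
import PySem

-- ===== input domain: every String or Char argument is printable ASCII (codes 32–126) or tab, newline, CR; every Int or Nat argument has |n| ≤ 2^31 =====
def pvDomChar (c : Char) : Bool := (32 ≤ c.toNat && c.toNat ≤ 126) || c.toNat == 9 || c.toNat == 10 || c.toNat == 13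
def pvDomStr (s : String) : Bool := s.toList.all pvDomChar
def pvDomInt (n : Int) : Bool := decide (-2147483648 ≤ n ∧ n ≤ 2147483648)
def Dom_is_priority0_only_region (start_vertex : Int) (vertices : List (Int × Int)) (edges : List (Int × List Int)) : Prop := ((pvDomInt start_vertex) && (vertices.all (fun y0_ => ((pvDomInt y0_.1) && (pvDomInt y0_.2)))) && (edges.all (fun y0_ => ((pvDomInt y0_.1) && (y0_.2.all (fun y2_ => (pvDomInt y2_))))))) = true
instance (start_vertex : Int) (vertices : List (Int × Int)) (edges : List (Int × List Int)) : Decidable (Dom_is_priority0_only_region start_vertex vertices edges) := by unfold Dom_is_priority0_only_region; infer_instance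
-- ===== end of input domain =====

-- B keeps A's start guard but replaces A's fused worklist BFS (deque, early False return) by
-- round-based fixpoint saturation: repeated full passes over the edge table grow the reachable
-- set until nothing changes, then one separate all() pass checks the priorities (alternative
-- algorithm, no frontier structure; not claimed faster).


-- shared dict primitives: vertices.get(v, -1) and edges.get(v, []) (first-match association lookup)
def pvPri (vertices : List (Int × Int)) (v : Int) : Int := (PySem.Dict.mk vertices).getD v (-1)
def pvAdj (edges : List (Int × List Int)) (v : Int) : List Int := (PySem.Dict.mk edges).getD v []
-- every value that is a key of `edges` or a listed neighbour; used only by the termination measures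
def pvUniv (edges : List (Int × List Int)) : List Int := edges.flatMap (fun e => e.1 :: e.2)

-- the next three lemmas are cited by the termination proofs of both loops
theorem pvAdj_eq_nil_of_not_mem_univ (edges : List (Int × List Int)) (v : Int)
    (h : v ∉ pvUniv edges) : pvAdj edges v = [] := by
  apply PySem.Dict.getD_of_get?_eq_none
  rw [PySem.Dict.get?_eq_none_iff_not_mem_keys]
  intro hk
  apply h
  simp only [pvUniv, List.mem_flatMap]
  simp only [PySem.Dict.keys, List.mem_map] at hk
  obtain ⟨p, hp, hpe⟩ := hk
  exact ⟨p, hp, by simp [hpe]⟩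

theorem pvSdiffCard_lt (U vis : List Int) (a : Int) (haU : a ∈ U) (hav : a ∉ vis) :
    (U.toFinset \ (vis ++ [a]).toFinset).card < (U.toFinset \ vis.toFinset).card := by
  apply Finset.card_lt_card
  constructor
  · intro x hx
    simp only [Finset.mem_sdiff, List.mem_toFinset, List.mem_append, List.mem_singleton] at hx ⊢
    exact ⟨hx.1, fun h => hx.2 (Or.inl h)⟩
  · intro hsub
    have h1 : a ∈ U.toFinset \ vis.toFinset := by simp [haU, hav]
    have h2 := hsub h1
    simp at h2

theorem pvSdiff_eq (U vis : List Int) (a : Int) (haU : a ∉ U) :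
    U.toFinset \ (vis ++ [a]).toFinset = U.toFinset \ vis.toFinset := by
  ext x
  simp only [Finset.mem_sdiff, List.mem_toFinset, List.mem_append, List.mem_singleton]
  constructor
  · rintro ⟨hx, hnx⟩; exact ⟨hx, fun h => hnx (Or.inl h)⟩
  · rintro ⟨hx, hnx⟩
    refine ⟨hx, fun h => ?_⟩
    rcases h with h | h
    · exact hnx h
    · exact haU (h ▸ hx)

-- cited by bFix's termination proof: the fixpoint passes only ever add members of pvUniv
theorem pvAdj_subset_univ (edges : List (Int × List Int)) (u n : Int)
    (h : n ∈ pvAdj edges u) : n ∈ pvUniv edges := by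
  unfold pvAdj at h
  rw [PySem.Dict.getD_eq_get?_getD] at h
  cases hg : (PySem.Dict.mk edges).get? u with
  | none => rw [hg] at h; simp at h
  | some v =>
    rw [hg] at h
    have hm : (u, v) ∈ edges := PySem.Dict.mem_items_of_get?_eq_some _ hg
    simp only [pvUniv, List.mem_flatMap]
    exact ⟨(u, v), hm, by simp [Option.getD] at h; simp [h]⟩

-- ===== PORT A =====
-- the while-queue loop of A: fused BFS that returns False at the first non-0 vertex
def aLoop (vertices : List (Int × Int)) (edges : List (Int × List Int))
    (visited : PySem.Set Int) (queue : List Int) : Bool :=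
  match queue with
  | [] => true
  | current :: rest =>
    if hv : PySem.Set.contains visited current = true then
      aLoop vertices edges visited rest
    else
      let visited' := PySem.Set.add visited current
      if pvPri vertices current != 0 then false
      else
        aLoop vertices edges visited'
          (rest ++ (pvAdj edges current).filter (fun n => !(PySem.Set.contains visited' n)))
termination_by ((((pvUniv edges).toFinset) \ visited.toFinset).card, queue.length)
decreasing_by
  · exact Prod.Lex.right _ (by simp)
  · have hadd : PySem.Set.add visited current = visited ++ [current] := by
      unfold PySem.Set.add; rw [if_neg hv]
    have hvm : current ∉ visited := by
      simpa [PySem.Set.contains, List.contains_iff_mem] using hv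
    rw [hadd]
    by_cases hc : current ∈ pvUniv edges
    · exact Prod.Lex.left _ _ (pvSdiffCard_lt _ _ _ hc hvm)
    · rw [pvSdiff_eq _ _ _ hc, pvAdj_eq_nil_of_not_mem_univ edges current hc]
      exact Prod.Lex.right _ (by simp)

def is_priority0_only_region (start_vertex : Int) (vertices : List (Int × Int)) (edges : List (Int × List Int)) : Bool :=
  if pvPri vertices start_vertex != 0 then false
  else aLoop vertices edges PySem.Set.empty [start_vertex]

-- ===== PORT B =====
-- inner loop of Source B: 'for n in edges.get(u, []): if n not in reachable: add; changed = True'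
def bInner (r : List Int) (ch : Bool) (ns : List Int) : List Int × Bool :=
  match ns with
  | [] => (r, ch)
  | n :: ns' => if r.contains n then bInner r ch ns' else bInner (r ++ [n]) true ns'

-- one full pass of Source B: 'for u in edges: if u in reachable: <inner loop>'
def bPass (edges : List (Int × List Int)) (r : List Int) (ch : Bool) (us : List Int) :
    List Int × Bool :=
  match us with
  | [] => (r, ch)
  | u :: us' =>
    if r.contains u then
      let p := bInner r ch (pvAdj edges u)
      bPass edges p.1 p.2 us'
    else bPass edges r ch us'

-- cited by bFix's termination proof (proved below the claim block would be too late: the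
-- recursion needs them by name here)
theorem bInner_mem (r : List Int) (ch : Bool) (ns : List Int) (x : Int) :
    x ∈ (bInner r ch ns).1 ↔ x ∈ r ∨ x ∈ ns := by
  induction ns generalizing r ch with
  | nil => simp [bInner]
  | cons n ns' ih =>
    unfold bInner
    by_cases h : r.contains n = true
    · have hm : n ∈ r := by simpa [List.contains_iff_mem] using h
      rw [if_pos h, ih]
      constructor
      · rintro (h' | h') <;> simp_all
      · rintro (h' | h')
        · exact Or.inl h'
        · rcases List.mem_cons.mp h' with h' | h'
          · exact Or.inl (h' ▸ hm)
          · exact Or.inr h'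
    · rw [if_neg h, ih]
      simp only [List.mem_append, List.mem_singleton, List.mem_cons]
      tauto

theorem bInner_true (r : List Int) (ch : Bool) (ns : List Int)
    (h : (bInner r ch ns).2 = true) : ch = true ∨ ∃ x ∈ ns, x ∉ r := by
  induction ns generalizing r ch with
  | nil => exact Or.inl h
  | cons n ns' ih =>
    unfold bInner at h
    by_cases hc : r.contains n = true
    · rw [if_pos hc] at h
      rcases ih _ _ h with h' | ⟨x, hx, hxr⟩
      · exact Or.inl h'
      · exact Or.inr ⟨x, List.mem_cons_of_mem _ hx, hxr⟩
    · exact Or.inr ⟨n, by simp, by simpa [List.contains_iff_mem] using hc⟩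

theorem bPass_mono (edges : List (Int × List Int)) (r : List Int) (ch : Bool) (us : List Int)
    (x : Int) (hx : x ∈ r) : x ∈ (bPass edges r ch us).1 := by
  induction us generalizing r ch with
  | nil => simpa [bPass]
  | cons u us' ih =>
    unfold bPass
    by_cases hc : r.contains u = true
    · rw [if_pos hc]
      exact ih _ _ ((bInner_mem _ _ _ _).mpr (Or.inl hx))
    · rw [if_neg hc]; exact ih _ _ hx

theorem bPass_sub_univ (edges : List (Int × List Int)) (r : List Int) (ch : Bool)
    (us : List Int) (x : Int) (hx : x ∈ (bPass edges r ch us).1) :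
    x ∈ r ∨ x ∈ pvUniv edges := by
  induction us generalizing r ch with
  | nil => simp [bPass] at hx; exact Or.inl hx
  | cons u us' ih =>
    unfold bPass at hx
    by_cases hc : r.contains u = true
    · rw [if_pos hc] at hx
      rcases ih _ _ hx with h' | h'
      · rcases (bInner_mem _ _ _ _).mp h' with h'' | h''
        · exact Or.inl h''
        · exact Or.inr (pvAdj_subset_univ edges u x h'')
      · exact Or.inr h'
    · rw [if_neg hc] at hx; exact ih _ _ hx

theorem bPass_true (edges : List (Int × List Int)) (r : List Int) (ch : Bool) (us : List Int)
    (h : (bPass edges r ch us).2 = true) :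
    ch = true ∨ ∃ x ∈ (bPass edges r ch us).1, x ∉ r := by
  induction us generalizing r ch with
  | nil => exact Or.inl h
  | cons u us' ih =>
    unfold bPass at h ⊢
    by_cases hc : r.contains u = true
    · rw [if_pos hc] at h ⊢
      rcases ih _ _ h with h' | ⟨x, hx, hxr⟩
      · rcases bInner_true _ _ _ h' with h'' | ⟨x, hx, hxr⟩
        · exact Or.inl h''
        · refine Or.inr ⟨x, bPass_mono _ _ _ _ _ ?_, hxr⟩
          exact (bInner_mem _ _ _ _).mpr (Or.inr hx)
      · refine Or.inr ⟨x, hx, fun hr => hxr ?_⟩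
        exact (bInner_mem _ _ _ _).mpr (Or.inl hr)
    · rw [if_neg hc] at h ⊢; exact ih _ _ h

-- the key list Source B's 'for u in edges' iterates over
def bKeys (edges : List (Int × List Int)) : List Int := edges.map Prod.fst

-- outer while-changed loop of Source B: repeat full passes until a pass adds nothing
def bFix (edges : List (Int × List Int)) (r : List Int) : List Int :=
  if h : (bPass edges r false (bKeys edges)).2 = true then
    bFix edges (bPass edges r false (bKeys edges)).1
  else (bPass edges r false (bKeys edges)).1
termination_by (((pvUniv edges).toFinset) \ r.toFinset).card
decreasing_by
  rcases bPass_true edges r false (bKeys edges) h with h' | ⟨x, hx, hxr⟩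
  · simp at h'
  · apply Finset.card_lt_card
    constructor
    · intro y hy
      simp only [Finset.mem_sdiff, List.mem_toFinset] at hy ⊢
      exact ⟨hy.1, fun hm => hy.2 (bPass_mono _ _ _ _ _ hm)⟩
    · intro hsub
      have hxu : x ∈ pvUniv edges := (bPass_sub_univ _ _ _ _ _ hx).resolve_left hxr
      have h1 : x ∈ (pvUniv edges).toFinset \ r.toFinset := by simp [hxu, hxr]
      have h2 := hsub h1
      simp only [Finset.mem_sdiff, List.mem_toFinset] at h2
      exact h2.2 hx

def is_priority0_only_region_alt (start_vertex : Int) (vertices : List (Int × Int)) (edges : List (Int × List Int)) : Bool :=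
  if pvPri vertices start_vertex != 0 then false
  else (bFix edges [start_vertex]).all (fun v => pvPri vertices v == 0)

-- ===== PRECONDITION & SPEC =====
def Spec_is_priority0_only_region (start_vertex : Int) (vertices : List (Int × Int)) (edges : List (Int × List Int)) (out : Bool) : Prop := out = is_priority0_only_region_alt start_vertex vertices edges
instance (start_vertex : Int) (vertices : List (Int × Int)) (edges : List (Int × List Int)) (out : Bool) : Decidable (Spec_is_priority0_only_region start_vertex vertices edges out) := by unfold Spec_is_priority0_only_region; infer_instance

-- ===== CLAIM (what is proved, stated in full; the proofs are below) =====
def Claim_equal_is_priority0_only_region : Prop := ∀ (start_vertex : Int) (vertices : List (Int × Int)) (edges : List (Int × List Int)), Dom_is_priority0_only_region start_vertex vertices edges → Spec_is_priority0_only_region start_vertex vertices edges (is_priority0_only_region start_vertex vertices edges)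

-- ===== LEMMAS AND PROOFS =====

-- reachability from s along pvAdj edges: the common semantics of both traversals
inductive pvReach (edges : List (Int × List Int)) (s : Int) : Int → Prop
  | refl : pvReach edges s s
  | step : ∀ {v n : Int}, pvReach edges s v → n ∈ pvAdj edges v → pvReach edges s n

theorem pvReach_trans (edges : List (Int × List Int)) (a b c : Int)
    (h1 : pvReach edges a b) (h2 : pvReach edges b c) : pvReach edges a c := by
  induction h2 with
  | refl => exact h1
  | step _ hmem ih => exact pvReach.step ih hmem

theorem pvReach_mem_of_closed (edges : List (Int × List Int)) (X : List Int)
    (hcl : ∀ u ∈ X, ∀ n ∈ pvAdj edges u, n ∈ X) (v w : Int)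
    (hv : v ∈ X) (h : pvReach edges v w) : w ∈ X := by
  induction h with
  | refl => exact hv
  | step _ hmem ih => exact hcl _ ih _ hmem

theorem aLoop_sound (vertices : List (Int × Int)) (edges : List (Int × List Int)) :
    ∀ (visited : PySem.Set Int) (queue : List Int),
      aLoop vertices edges visited queue = true →
      (∀ u ∈ visited, pvPri vertices u = 0) →
      (∀ u ∈ visited, ∀ n ∈ pvAdj edges u, n ∈ visited ∨ n ∈ queue) →
      ∀ v, (v ∈ visited ∨ v ∈ queue) → ∀ w, pvReach edges v w → pvPri vertices w = 0 := by
  intro visited queue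
  fun_induction aLoop vertices edges visited queue with
  | case1 visited =>
    intro _ hz hcl v hv w hw
    rcases hv with hv | hv
    · exact hz _ (pvReach_mem_of_closed edges visited
        (fun u hu n hn => (hcl u hu n hn).resolve_right (by simp)) v w hv hw)
    · simp at hv
  | case2 visited current rest hv ih =>
    have hvmem : current ∈ visited := by
      simpa [PySem.Set.contains, List.contains_iff_mem] using hv
    intro h hz hcl v hmem w hw
    refine ih h hz ?_ v ?_ w hw
    · intro u hu n hn
      rcases hcl u hu n hn with hn | hn
      · exact Or.inl hn
      · rcases List.mem_cons.mp hn with hn | hn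
        · exact Or.inl (hn ▸ hvmem)
        · exact Or.inr hn
    · rcases hmem with hm | hm
      · exact Or.inl hm
      · rcases List.mem_cons.mp hm with hm | hm
        · exact Or.inl (hm ▸ hvmem)
        · exact Or.inr hm
  | case3 visited current rest hv hp =>
    intro h; simp at h
  | case4 visited current rest hv visited' hp ih =>
    have hvmem : current ∉ visited := by
      simpa [PySem.Set.contains, List.contains_iff_mem] using hv
    have hp' : pvPri vertices current = 0 := by simpa using hp
    have hvis' : visited' = visited ++ [current] := by
      show PySem.Set.add visited current = _
      unfold PySem.Set.add; rw [if_neg hv]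
    intro h hz hcl v hmem w hw
    refine ih h ?_ ?_ v ?_ w hw
    · intro u hu
      rw [hvis'] at hu
      rcases List.mem_append.mp hu with hu | hu
      · exact hz u hu
      · simp at hu; exact hu ▸ hp'
    · intro u hu n hn
      rw [hvis'] at hu ⊢
      rcases List.mem_append.mp hu with hu | hu
      · rcases hcl u hu n hn with h' | h'
        · exact Or.inl (List.mem_append.mpr (Or.inl h'))
        · rcases List.mem_cons.mp h' with h' | h'
          · exact Or.inl (by simp [h'])
          · exact Or.inr (List.mem_append.mpr (Or.inl h'))
      · simp only [List.mem_singleton] at hu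
        subst hu
        by_cases hm : n ∈ visited ++ [u]
        · exact Or.inl hm
        · refine Or.inr (List.mem_append.mpr (Or.inr ?_))
          rw [List.mem_filter]
          exact ⟨hn, by simp [PySem.Set.contains, hm]⟩
    · rcases hmem with hm | hm
      · exact Or.inl (by rw [hvis']; exact List.mem_append.mpr (Or.inl hm))
      · rcases List.mem_cons.mp hm with hm | hm
        · exact Or.inl (by rw [hvis']; simp [hm])
        · exact Or.inr (List.mem_append.mpr (Or.inl hm))

theorem aLoop_complete (vertices : List (Int × Int)) (edges : List (Int × List Int)) :
    ∀ (visited : PySem.Set Int) (queue : List Int),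
      (∀ u ∈ queue, ∀ w, pvReach edges u w → pvPri vertices w = 0) →
      aLoop vertices edges visited queue = true := by
  intro visited queue
  fun_induction aLoop vertices edges visited queue with
  | case1 visited => intro _; rfl
  | case2 visited current rest hv ih =>
    intro hq
    exact ih (fun u hu => hq u (List.mem_cons_of_mem _ hu))
  | case3 visited current rest hv hp =>
    intro hq
    exact absurd (hq current (by simp) current pvReach.refl) (by simpa using hp)
  | case4 visited current rest hv visited' hp ih =>
    intro hq
    apply ih
    intro u hu w hw
    rcases List.mem_append.mp hu with hu | hu
    · exact hq u (List.mem_cons_of_mem _ hu) w hw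
    · have hadj : u ∈ pvAdj edges current := (List.mem_filter.mp hu).1
      exact hq current (by simp) w
        (pvReach_trans edges current u w (pvReach.step pvReach.refl hadj) hw)

-- B side: characterisation of a pass that reports no change
theorem bInner_snd_true (r : List Int) (ns : List Int) : (bInner r true ns).2 = true := by
  induction ns generalizing r with
  | nil => rfl
  | cons n ns' ih =>
    unfold bInner
    by_cases hc : r.contains n = true
    · rw [if_pos hc]; exact ih r
    · rw [if_neg hc]; exact ih (r ++ [n])

theorem bPass_snd_true (edges : List (Int × List Int)) (r : List Int) (us : List Int) :
    (bPass edges r true us).2 = true := by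
  induction us generalizing r with
  | nil => rfl
  | cons u us' ih =>
    unfold bPass
    by_cases hc : r.contains u = true
    · rw [if_pos hc]
      show (bPass edges (bInner r true (pvAdj edges u)).1 (bInner r true (pvAdj edges u)).2 us').2 = true
      rw [bInner_snd_true]
      exact ih _
    · rw [if_neg hc]; exact ih r

theorem bInner_false (r : List Int) (ch : Bool) (ns : List Int)
    (h : (bInner r ch ns).2 = false) :
    bInner r ch ns = (r, ch) ∧ ∀ n ∈ ns, n ∈ r := by
  induction ns generalizing r ch with
  | nil => exact ⟨rfl, by simp⟩
  | cons n ns' ih =>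
    unfold bInner at h ⊢
    by_cases hc : r.contains n = true
    · rw [if_pos hc] at h ⊢
      obtain ⟨h1, h2⟩ := ih _ _ h
      refine ⟨h1, ?_⟩
      intro m hm
      rcases List.mem_cons.mp hm with hm | hm
      · exact hm ▸ (by simpa [List.contains_iff_mem] using hc)
      · exact h2 m hm
    · rw [if_neg hc] at h
      rw [bInner_snd_true] at h
      simp at h

theorem bPass_false (edges : List (Int × List Int)) (r : List Int) (ch : Bool) (us : List Int)
    (h : (bPass edges r ch us).2 = false) :
    (bPass edges r ch us).1 = r ∧ ∀ u ∈ us, u ∈ r → ∀ n ∈ pvAdj edges u, n ∈ r := by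
  induction us generalizing r ch with
  | nil => exact ⟨rfl, by simp⟩
  | cons u us' ih =>
    unfold bPass at h ⊢
    by_cases hc : r.contains u = true
    · rw [if_pos hc] at h ⊢
      have hin : (bInner r ch (pvAdj edges u)).2 = false := by
        cases hb : (bInner r ch (pvAdj edges u)).2
        · rfl
        · exfalso
          rw [show (bPass edges (bInner r ch (pvAdj edges u)).1 (bInner r ch (pvAdj edges u)).2 us').2
                = (bPass edges (bInner r ch (pvAdj edges u)).1 true us').2 from by rw [hb]] at h
          rw [bPass_snd_true] at h
          exact absurd h (by simp)
      obtain ⟨heq, hsub⟩ := bInner_false _ _ _ hin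
      rw [heq] at h ⊢
      obtain ⟨h1, h2⟩ := ih _ _ h
      refine ⟨h1, ?_⟩
      intro v hv hvr n hn
      rcases List.mem_cons.mp hv with hv | hv
      · exact hsub n (hv ▸ hn)
      · exact h2 v hv hvr n hn
    · rw [if_neg hc] at h ⊢
      obtain ⟨h1, h2⟩ := ih _ _ h
      refine ⟨h1, ?_⟩
      intro v hv hvr n hn
      rcases List.mem_cons.mp hv with hv | hv
      · exact absurd (by simpa [List.contains_iff_mem] using hvr : r.contains v = true)
          (hv ▸ hc)
      · exact h2 v hv hvr n hn

theorem bInner_sound (P : Int → Prop) (r : List Int) (ch : Bool) (ns : List Int)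
    (hr : ∀ x ∈ r, P x) (hn : ∀ x ∈ ns, P x) : ∀ x ∈ (bInner r ch ns).1, P x := by
  intro x hx
  rcases (bInner_mem _ _ _ _).mp hx with h | h
  · exact hr x h
  · exact hn x h

theorem bPass_sound (edges : List (Int × List Int)) (P : Int → Prop)
    (hP : ∀ u, P u → ∀ n ∈ pvAdj edges u, P n) :
    ∀ (r : List Int) (ch : Bool) (us : List Int),
      (∀ x ∈ r, P x) → ∀ x ∈ (bPass edges r ch us).1, P x := by
  intro r ch us
  induction us generalizing r ch with
  | nil => intro hr x hx; simp [bPass] at hx; exact hr x hx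
  | cons u us' ih =>
    intro hr
    unfold bPass
    by_cases hc : r.contains u = true
    · rw [if_pos hc]
      have hu : u ∈ r := by simpa [List.contains_iff_mem] using hc
      exact ih _ _ (bInner_sound P r ch (pvAdj edges u) hr (hP u (hr u hu)))
    · rw [if_neg hc]; exact ih _ _ hr

theorem bFix_mono (edges : List (Int × List Int)) :
    ∀ (r : List Int) (x : Int), x ∈ r → x ∈ bFix edges r := by
  intro r
  fun_induction bFix edges r with
  | case1 r hp ih =>
    intro x hx
    exact ih x (bPass_mono _ _ _ _ _ hx)
  | case2 r hp =>
    intro x hx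
    exact bPass_mono _ _ _ _ _ hx

theorem bFix_closed (edges : List (Int × List Int)) :
    ∀ (r : List Int), ∀ u ∈ bFix edges r, ∀ n ∈ pvAdj edges u, n ∈ bFix edges r := by
  intro r
  fun_induction bFix edges r with
  | case1 r hp ih => exact ih
  | case2 r hp =>
    have hp' : (bPass edges r false (bKeys edges)).2 = false := by
      cases hb : (bPass edges r false (bKeys edges)).2
      · rfl
      · exact absurd hb hp
    obtain ⟨h1, h2⟩ := bPass_false edges r false (bKeys edges) hp'
    rw [h1]
    intro u hu n hn
    by_cases hk : u ∈ edges.map Prod.fst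
    · exact h2 u hk hu n hn
    · -- u is not a key of edges: its adjacency list is empty
      have hnil : pvAdj edges u = [] := by
        apply PySem.Dict.getD_of_get?_eq_none
        rw [PySem.Dict.get?_eq_none_iff_not_mem_keys]
        intro hmem
        apply hk
        simpa [PySem.Dict.keys] using hmem
      rw [hnil] at hn; simp at hn

theorem bFix_sound (edges : List (Int × List Int)) (P : Int → Prop)
    (hP : ∀ u, P u → ∀ n ∈ pvAdj edges u, P n) :
    ∀ (r : List Int), (∀ x ∈ r, P x) → ∀ x ∈ bFix edges r, P x := by
  intro r
  fun_induction bFix edges r with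
  | case1 r hp ih => intro hr; exact ih (bPass_sound edges P hP r false _ hr)
  | case2 r hp => intro hr; exact bPass_sound edges P hP r false _ hr

theorem bFix_iff (edges : List (Int × List Int)) (s x : Int) :
    x ∈ bFix edges [s] ↔ pvReach edges s x := by
  constructor
  · intro hx
    refine bFix_sound edges (pvReach edges s)
      (fun u hu n hn => pvReach.step hu hn) [s] ?_ x hx
    intro y hy
    simp only [List.mem_singleton] at hy
    exact hy ▸ pvReach.refl
  · intro hx
    induction hx with
    | refl => exact bFix_mono edges [s] s (by simp)
    | step _ hmem ih => exact bFix_closed edges [s] _ ih _ hmem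

-- ===== VERDICT (by name: the statement is the Claim_ definition above) =====
theorem is_priority0_only_region_spec : Claim_equal_is_priority0_only_region := by
  intro s vertices edges _dom
  unfold Spec_is_priority0_only_region is_priority0_only_region is_priority0_only_region_alt
  by_cases hg : (pvPri vertices s != 0) = true
  · simp [hg]
  · rw [if_neg hg, if_neg hg]
    have key : aLoop vertices edges PySem.Set.empty [s] = true ↔
        (bFix edges [s]).all (fun v => pvPri vertices v == 0) = true := by
      rw [List.all_eq_true]
      constructor
      · intro h v hv
        have := aLoop_sound vertices edges PySem.Set.empty [s] h
          (by simp [PySem.Set.empty]) (by simp [PySem.Set.empty])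
          s (Or.inr (by simp)) v ((bFix_iff edges s v).mp hv)
        simpa using this
      · intro h
        apply aLoop_complete
        intro u hu w hw
        simp only [List.mem_singleton] at hu
        subst hu
        simpa using h w ((bFix_iff edges u w).mpr hw)
    rcases Bool.eq_false_or_eq_true (aLoop vertices edges PySem.Set.empty [s]) with ha | ha <;>
      rcases Bool.eq_false_or_eq_true ((bFix edges [s]).all (fun v => pvPri vertices v == 0)) with hb | hb <;>
      simp_all
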